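-- pv_equiv track=rewrite | github.com/polyipseity/ledger | scripts/format.py | _sort_props
-- ===== SOURCE A (Python) =====
-- from collections.abc import Callable, Iterable, Sequence
--
-- def _sort_props(line: str) -> str:
--     """Format a single line comments by grouping and sorting key:value properties.
--
--     The function accepts lines of the form ``<code>  ; <comment>`` and will
--     group consecutive ``key:value`` segments, sort properties within each
--     group by key, and reassemble the comment in a consistent, human-friendly
--     order. Lines without the ``  ;`` separator are returned unchanged.
--     """
--     components = line.split("  ;", 1)
--     if len(components) != 2:
--         return line
--     code, cmt = components
--
--     formatted_parts: list[str] = []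
--     for part in _group_props(cmt.split(",")):
--         if isinstance(part, str):
--             formatted_parts.append(part.strip())
--             continue
--         # part is a list[tuple[str,str]] - sort by key then join
--         formatted_parts.append(
--             ", ".join(
--                 ": ".join(prop)
--                 for prop in sorted(tuple(cmp.strip() for cmp in grp) for grp in part)
--             )
--         )
--
--     return f"{code}  ; {', '.join(formatted_parts)}"
--
-- def _group_props(sections: Iterable[str]) -> Iterable[str | Sequence[tuple[str, str]]]:
--     """Yield grouped property parts used by the formatter.
--
--     The helper mirrors the previous inner helper in `sortProps`, grouping
--     consecutive `key:value` pairs and yielding either the key (str) or a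
--     Sequence of `(key, value)` tuples when appropriate. Extracted to make unit
--     testing straightforward.
--     """
--     ret: list[tuple[str, str]] = []
--     for section in sections:
--         sec = tuple(section.split(":", 1))
--         if len(sec) == 2:
--             ret.append(sec)
--             continue
--         if ret:
--             yield ret
--             ret = []
--         yield sec[0]
--     if ret:
--         yield ret
-- ===== SOURCE B (Python) =====
-- def _sort_props(line: str) -> str:
--     """Format a comment line by tagging each key:value segment with a run id,
--     sorting ALL (run, key, value) triples once globally, and reassembling via a
--     dict keyed by run id; non-kv segments pass through in place."""
--     components = line.split("  ;", 1)
--     if len(components) != 2: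
--         return line
--     code, cmt = components
--     order = []    # output skeleton: run ids (ints) and plain stripped strings
--     triples = []  # (run_id, key, value) for every key:value segment
--     run = 0
--     prev_kv = False
--     for s in cmt.split(","):
--         if ":" in s:
--             if not prev_kv:
--                 run += 1
--                 order.append(run)
--             k, v = s.split(":", 1)
--             triples.append((run, k.strip(), v.strip()))
--             prev_kv = True
--         else:
--             order.append(s.strip())
--             prev_kv = False
--     triples.sort()
--     by_run = {}
--     for r, k, v in triples:
--         by_run.setdefault(r, []).append(f"{k}: {v}")
--     parts = [", ".join(by_run[t]) if isinstance(t, int) else t for t in order]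
--     return f"{code}  ; {', '.join(parts)}"
-- ===== Notes on version B (the rewrite author's own statement) =====
-- stated objective: alternative
-- what changed: Instead of grouping consecutive key:value segments into runs and sorting each run (A's stateful generator with a pair buffer and flush), B tags every key:value segment with an integer run id in one pass, sorts all (run, key, value) triples in ONE global sort, buckets the sorted triples into a dict keyed by run id, and maps an output skeleton (run ids interleaved with stripped plain segments) through that dict.
import Mathlib
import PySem

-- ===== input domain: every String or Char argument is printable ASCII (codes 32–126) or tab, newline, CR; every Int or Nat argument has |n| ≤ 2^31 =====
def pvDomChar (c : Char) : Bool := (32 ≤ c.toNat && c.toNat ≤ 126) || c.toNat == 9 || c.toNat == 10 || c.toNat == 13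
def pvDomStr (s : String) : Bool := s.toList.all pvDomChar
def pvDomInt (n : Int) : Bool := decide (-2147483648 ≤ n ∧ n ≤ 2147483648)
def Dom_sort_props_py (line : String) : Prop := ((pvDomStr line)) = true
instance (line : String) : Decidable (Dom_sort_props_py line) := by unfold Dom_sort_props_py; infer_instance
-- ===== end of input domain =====

-- B replaces A's run-grouping generator (pair buffer + flush, per-run sorts) by a different
-- algorithm: tag each key:value segment with an integer run id in one pass, sort ALL
-- (run, key, value) triples in one global sort, bucket them into a dict keyed by run id,
-- and map an output skeleton (run ids / stripped plain segments) through that dict.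

-- ===== PORT A =====
-- A-side helper: _group_props — the stateful generator with its 'ret' buffer and final flush
def groupPropsA : List String → List (String × String) → List (Sum String (List (String × String)))
  | [], ret => if ret.isEmpty then [] else [Sum.inr ret]
  | sec :: rest, ret =>
    match (PySem.Str.splitMax? sec ":" 1).getD [] with
    | [k, v] => groupPropsA rest (ret ++ [(k, v)])
    | l => (if ret.isEmpty then [] else [Sum.inr ret]) ++ Sum.inl (l.headD "") :: groupPropsA rest []

-- the body of A's for-loop over _group_props: str part → strip; list part → sort stripped pairs, join
def fmtPartA : Sum String (List (String × String)) → String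
  | Sum.inl s => PySem.Str.strip s
  | Sum.inr grp =>
      PySem.Str.join ", "
        ((PySem.List.sorted2 (grp.map fun p => (PySem.Str.strip p.1, PySem.Str.strip p.2))
            Prod.fst Prod.snd).map fun p => PySem.Str.join ": " [p.1, p.2])

def sort_props_py (line : String) : String :=
  match PySem.Str.splitMax? line "  ;" 1 with
  | some [code, cmt] =>
      let parts := (groupPropsA ((PySem.Str.split? cmt ",").getD []) []).map fmtPartA
      PySem.Str.join "" [code, "  ; ", PySem.Str.join ", " parts]
  | _ => line

-- ===== PORT B =====
-- B-side helper: k, v = s.split(":", 1); (k.strip(), v.strip())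
def pairOfB (s : String) : String × String :=
  let pieces := ((PySem.Str.splitMax? s ":" 1).getD []).map PySem.Str.strip
  (pieces.headD "", pieces.tail.headD "")

-- B-side helper: the single pass building the output skeleton `order` and the tagged `triples`
def scanSegsB : List String → Int → Bool → List (Sum Int String) → List (Int × String × String) →
    List (Sum Int String) × List (Int × String × String)
  | [], _, _, order, triples => (order, triples)
  | s :: rest, run, prevKv, order, triples =>
    if PySem.Str.isIn ":" s then
      let run' := if prevKv then run else run + 1
      let order' := if prevKv then order else order ++ [Sum.inl run']
      scanSegsB rest run' true order' (triples ++ [(run', pairOfB s)])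
    else
      scanSegsB rest run false (order ++ [Sum.inr (PySem.Str.strip s)]) triples

-- triples.sort(): Python's lexicographic order on the 3-tuples, as the lex product order
def tripleKeyB (t : Int × String × String) : Int ×ₗ (String ×ₗ String) :=
  toLex (t.1, toLex (t.2.1, t.2.2))

def sort_props_py_alt (line : String) : String :=
  let components := (PySem.Str.splitMax? line "  ;" 1).getD []
  if components.length ≠ 2 then line
  else
    let code := components.headD ""
    let cmt := components.tail.headD ""
    let res := scanSegsB ((PySem.Str.split? cmt ",").getD []) 0 false [] []
    let sortedTriples := PySem.List.sorted res.2 tripleKeyB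
    -- by_run.setdefault(r, []).append(f"{k}: {v}")
    let byRun : PySem.Dict Int (List String) :=
      sortedTriples.foldl
        (fun d t => d.insert t.1 (d.getD t.1 [] ++ [PySem.Str.join "" [t.2.1, ": ", t.2.2]]))
        (PySem.Dict.empty : PySem.Dict Int (List String))
    -- by_run[t]: the key is always present; getD [] is the total rendering of that lookup
    let parts := res.1.map fun t =>
      match t with
      | Sum.inl r => PySem.Str.join ", " (byRun.getD r [])
      | Sum.inr s => s
    PySem.Str.join "" [code, "  ; ", PySem.Str.join ", " parts]

-- ===== PRECONDITION & SPEC =====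
def Spec_sort_props_py (line : String) (out : String) : Prop := out = sort_props_py_alt line
instance (line : String) (out : String) : Decidable (Spec_sort_props_py line out) := by unfold Spec_sort_props_py; infer_instance

-- ===== CLAIM (what is proved, stated in full; the proofs are below) =====
def Claim_equal_sort_props_py : Prop := ∀ (line : String), Dom_sort_props_py line → Spec_sort_props_py line (sort_props_py line)

-- ===== LEMMAS AND PROOFS =====

lemma go_zero (sep : List Char) (fuel : Nat) (l cur : List Char) (acc : List (List Char)) :
    PySem.Chars.splitOnMax.go sep fuel 0 l cur acc = ((cur.reverse ++ l) :: acc).reverse := by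
  cases fuel <;> cases l <;> simp [PySem.Chars.splitOnMax.go]

lemma go_one (l : List Char) : ∀ (fuel : Nat) (cur : List Char) (acc : List (List Char)),
    l.length ≤ fuel →
    PySem.Chars.splitOnMax.go [':'] fuel 1 l cur acc =
      acc.reverse ++ (if ':' ∈ l then
        [cur.reverse ++ l.takeWhile (· != ':'), (l.dropWhile (· != ':')).tail]
      else [cur.reverse ++ l]) := by
  induction l with
  | nil =>
      intro fuel cur acc _
      cases fuel <;> simp [PySem.Chars.splitOnMax.go]
  | cons c rest ih =>
      intro fuel cur acc hf
      cases fuel with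
      | zero => simp at hf
      | succ f =>
          by_cases hc : c = ':'
          · subst hc
            simp [PySem.Chars.splitOnMax.go, List.isPrefixOf, go_zero]
          · have hstep : PySem.Chars.splitOnMax.go [':'] (f + 1) 1 (c :: rest) cur acc =
                PySem.Chars.splitOnMax.go [':'] f 1 rest (c :: cur) acc := by
              simp [PySem.Chars.splitOnMax.go, List.isPrefixOf]
              intro h; exact absurd h.symm hc
            rw [hstep, ih f (c :: cur) acc (by simpa using hf)]
            simp [hc, Ne.symm hc]

lemma splitColon1 (cs : List Char) :
    PySem.Chars.splitOnMax cs [':'] 1 =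
      if ':' ∈ cs then [cs.takeWhile (· != ':'), (cs.dropWhile (· != ':')).tail] else [cs] := by
  unfold PySem.Chars.splitOnMax
  norm_num
  rw [go_one cs (cs.length + 1) [] [] (by omega)]
  simp

lemma isIn_colon_iff (s : String) : PySem.Str.isIn ":" s = true ↔ ':' ∈ s.toList := by
  rw [show PySem.Str.isIn ":" s = PySem.Chars.isIn [':'] s.toList from rfl]
  rw [PySem.Chars.isIn_iff_infix]
  exact List.singleton_infix_iff ':' s.toList

lemma split_not_kv (s : String) (h : PySem.Str.isIn ":" s = false) :
    (PySem.Str.splitMax? s ":" 1).getD [] = [s] := by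
  have hm : ':' ∉ s.toList := fun hmem => by
    rw [(isIn_colon_iff s).2 hmem] at h; exact Bool.true_eq_false.mp h
  simp [PySem.Str.splitMax?, PySem.Chars.splitMax?, splitColon1, hm]

lemma split_kv (s : String) (h : PySem.Str.isIn ":" s = true) :
    ∃ k v, (PySem.Str.splitMax? s ":" 1).getD [] = [k, v] := by
  have hm : ':' ∈ s.toList := (isIn_colon_iff s).1 h
  refine ⟨String.ofList (s.toList.takeWhile (· != ':')),
          String.ofList ((s.toList.dropWhile (· != ':')).tail), ?_⟩
  simp [PySem.Str.splitMax?, PySem.Chars.splitMax?, splitColon1, hm]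

-- proof-side decomposition of the comma segments into maximal runs (groups) with their colon-key
def groupbyColon : List String → List (Bool × List String)
  | [] => []
  | s :: rest =>
    let k := PySem.Str.isIn ":" s
    match groupbyColon rest with
    | (k', g) :: gs => if k = k' then (k, s :: g) :: gs else (k, [s]) :: (k', g) :: gs
    | [] => [(k, [s])]

def rawPair (s : String) : String × String :=
  match (PySem.Str.splitMax? s ":" 1).getD [] with
  | [k, v] => (k, v)
  | l => (l.headD "", "")

def toSum (kg : Bool × List String) : List (Sum String (List (String × String))) :=
  if kg.1 then [Sum.inr (kg.2.map rawPair)] else kg.2.map Sum.inl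

def flushPrepend (ret : List (String × String))
    (l : List (Sum String (List (String × String)))) :
    List (Sum String (List (String × String))) :=
  if ret.isEmpty then l
  else match l with
    | Sum.inr g :: t => Sum.inr (ret ++ g) :: t
    | _ => Sum.inr ret :: l

lemma groupby_key (sections : List String) :
    ∀ kg ∈ groupbyColon sections, ∀ s ∈ kg.2, PySem.Str.isIn ":" s = kg.1 := by
  induction sections with
  | nil => simp [groupbyColon]
  | cons sec rest ih =>
      intro kg hkg s hs
      rcases hg : groupbyColon rest with _ | ⟨⟨k', g⟩, gs⟩ <;>
        simp only [groupbyColon, hg] at hkg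
      · simp at hkg
        subst hkg
        simp at hs; subst hs; rfl
      · by_cases hk : PySem.Chars.isIn [':'] sec.toList = k'
        · simp [hk] at hkg
          rcases hkg with hkg | hkg
          · subst hkg
            simp at hs
            rcases hs with hs | hs
            · subst hs; exact hk
            · exact ih (k', g) (by rw [hg]; simp) s hs
          · exact ih kg (by rw [hg]; simp [hkg]) s hs
        · simp [hk] at hkg
          rcases hkg with hkg | hkg
          · subst hkg; simp at hs; subst hs; rfl
          · exact ih kg (by rw [hg]; simp [hkg]) s hs

lemma groupby_nonempty (sections : List String) :
    ∀ kg ∈ groupbyColon sections, kg.2 ≠ [] := by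
  induction sections with
  | nil => simp [groupbyColon]
  | cons sec rest ih =>
      intro kg hkg
      rcases hg : groupbyColon rest with _ | ⟨⟨k', g⟩, gs⟩ <;>
        simp only [groupbyColon, hg] at hkg
      · simp at hkg; simp [hkg]
      · by_cases hk : PySem.Chars.isIn [':'] sec.toList = k'
        · simp [hk] at hkg
          rcases hkg with hkg | hkg
          · simp [hkg]
          · exact ih kg (by rw [hg]; simp [hkg])
        · simp [hk] at hkg
          rcases hkg with hkg | hkg
          · simp [hkg]
          · exact ih kg (by rw [hg]; simp [hkg])

lemma group_main (sections : List String) : ∀ ret,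
    groupPropsA sections ret = flushPrepend ret ((groupbyColon sections).flatMap toSum) := by
  induction sections with
  | nil =>
      intro ret
      cases ret <;> simp [groupPropsA, groupbyColon, flushPrepend]
  | cons sec rest ih =>
      intro ret
      cases hk : PySem.Str.isIn ":" sec with
      | true =>
          obtain ⟨k, v, hsplit⟩ := split_kv sec hk
          have hraw : rawPair sec = (k, v) := by simp [rawPair, hsplit]
          have hA : groupPropsA (sec :: rest) ret = groupPropsA rest (ret ++ [(k, v)]) := by
            simp only [groupPropsA, hsplit]
          rw [hA, ih]
          have hkc : PySem.Chars.isIn [':'] sec.toList = true := hk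
          rcases hg : groupbyColon rest with _ | ⟨⟨k', g⟩, gs⟩
          · simp [groupbyColon, hg, hkc, toSum, flushPrepend, hraw]
          · by_cases hk' : k' = true
            · subst hk'
              have : groupbyColon (sec :: rest) = (true, sec :: g) :: gs := by
                simp [groupbyColon, hg, hkc]
              rw [this]
              simp [toSum, flushPrepend, hraw]
            · have hk'f : k' = false := by simpa using hk'
              subst hk'f
              have : groupbyColon (sec :: rest) = (true, [sec]) :: (false, g) :: gs := by
                simp [groupbyColon, hg, hkc]
              rw [this]
              have hne : g ≠ [] :=
                groupby_nonempty rest (false, g) (by rw [hg]; simp)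
              obtain ⟨s0, g', rfl⟩ := List.exists_cons_of_ne_nil hne
              simp [toSum, flushPrepend, hraw]
      | false =>
          have hsplit := split_not_kv sec hk
          have hkc : PySem.Chars.isIn [':'] sec.toList = false := hk
          have hA : groupPropsA (sec :: rest) ret =
              (if ret.isEmpty then [] else [Sum.inr ret]) ++
                Sum.inl sec :: groupPropsA rest [] := by
            simp only [groupPropsA, hsplit]
            rfl
          rw [hA, ih [], show flushPrepend [] ((groupbyColon rest).flatMap toSum) =
              (groupbyColon rest).flatMap toSum by simp [flushPrepend]]
          rcases hg : groupbyColon rest with _ | ⟨⟨k', g⟩, gs⟩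
          · simp [groupbyColon, hg, hkc, toSum, flushPrepend]
            cases ret <;> simp
          · by_cases hk' : k' = true
            · subst hk'
              have hgb : groupbyColon (sec :: rest) = (false, [sec]) :: (true, g) :: gs := by
                simp [groupbyColon, hg, hkc]
              rw [hgb]
              simp [toSum, flushPrepend]
              cases ret <;> simp
            · have hk'f : k' = false := by simpa using hk'
              subst hk'f
              have hgb : groupbyColon (sec :: rest) = (false, sec :: g) :: gs := by
                simp [groupbyColon, hg, hkc]
              rw [hgb]
              simp [toSum, flushPrepend]
              cases ret <;> simp

-- A's formatted parts, expressed over the run decomposition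
lemma parts_eq (sections : List String) :
    (groupPropsA sections []).map fmtPartA =
      (groupbyColon sections).flatMap fun kg =>
        if kg.1 then
          [PySem.Str.join ", "
            ((PySem.List.sorted2 (kg.2.map pairOfB) Prod.fst Prod.snd).map
              fun p => PySem.Str.join ": " [p.1, p.2])]
        else kg.2.map PySem.Str.strip := by
  rw [group_main sections [], show flushPrepend [] ((groupbyColon sections).flatMap toSum) =
      (groupbyColon sections).flatMap toSum by simp [flushPrepend]]
  rw [List.map_flatMap]
  apply List.flatMap_congr
  intro kg hkg
  cases hkk : kg.1 with
  | true =>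
      have hmap : (kg.2.map rawPair).map
            (fun p => (PySem.Str.strip p.1, PySem.Str.strip p.2)) = kg.2.map pairOfB := by
        rw [List.map_map]
        apply List.map_congr_left
        intro s hs
        have hks : PySem.Str.isIn ":" s = true := by
          rw [groupby_key sections kg hkg s hs, hkk]
        obtain ⟨k, v, hsplit⟩ := split_kv s hks
        simp [Function.comp, rawPair, pairOfB, hsplit]
      simp only [toSum, hkk, if_true, List.map_cons, List.map_nil, fmtPartA]
      rw [hmap]
  | false =>
      simp only [toSum, hkk]
      simp [Function.comp, fmtPartA]

-- interpretation of B's scan over the run decomposition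
def gOrd : List (Bool × List String) → Int → Bool → List (Sum Int String)
  | [], _, _ => []
  | (b, g) :: gs, r, p =>
    if b then (if p then [] else [Sum.inl (r + 1)]) ++ gOrd gs (if p then r else r + 1) true
    else g.map (fun s => Sum.inr (PySem.Str.strip s)) ++ gOrd gs r false

def gTri : List (Bool × List String) → Int → Bool → List (Int × String × String)
  | [], _, _ => []
  | (b, g) :: gs, r, p =>
    if b then g.map (fun s => ((if p then r else r + 1), pairOfB s)) ++
              gTri gs (if p then r else r + 1) true
    else gTri gs r false

def gAssoc : List (Bool × List String) → Int → Bool → List (Int × List String)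
  | [], _, _ => []
  | (b, g) :: gs, r, p =>
    if b then ((if p then r else r + 1), g) :: gAssoc gs (if p then r else r + 1) true
    else gAssoc gs r false

lemma scan_main (sections : List String) : ∀ r p o t,
    scanSegsB sections r p o t =
      (o ++ gOrd (groupbyColon sections) r p, t ++ gTri (groupbyColon sections) r p) := by
  induction sections with
  | nil => simp [scanSegsB, groupbyColon, gOrd, gTri]
  | cons sec rest ih =>
      intro r p o t
      cases hk : PySem.Str.isIn ":" sec with
      | true =>
          have hkc : PySem.Chars.isIn [':'] sec.toList = true := hk
          have hstep : scanSegsB (sec :: rest) r p o t =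
              scanSegsB rest (if p then r else r + 1) true
                (if p then o else o ++ [Sum.inl (if p then r else r + 1)])
                (t ++ [((if p then r else r + 1), pairOfB sec)]) := by
            simp only [scanSegsB, hk, if_true]
          rw [hstep, ih]
          rcases hg : groupbyColon rest with _ | ⟨⟨k', g⟩, gs⟩
          · have : groupbyColon (sec :: rest) = [(true, [sec])] := by
              simp [groupbyColon, hg, hkc]
            rw [this]
            cases p <;> simp [gOrd, gTri]
          · by_cases hk' : k' = true
            · subst hk'
              have : groupbyColon (sec :: rest) = (true, sec :: g) :: gs := by
                simp [groupbyColon, hg, hkc]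
              rw [this]
              cases p <;> simp [gOrd, gTri]
            · have hk'f : k' = false := by simpa using hk'
              subst hk'f
              have : groupbyColon (sec :: rest) = (true, [sec]) :: (false, g) :: gs := by
                simp [groupbyColon, hg, hkc]
              rw [this]
              cases p <;> simp [gOrd, gTri]
      | false =>
          have hkc : PySem.Chars.isIn [':'] sec.toList = false := hk
          have hstep : scanSegsB (sec :: rest) r p o t =
              scanSegsB rest r false (o ++ [Sum.inr (PySem.Str.strip sec)]) t := by
            simp only [scanSegsB, hk, Bool.false_eq_true, if_false]
          rw [hstep, ih]
          rcases hg : groupbyColon rest with _ | ⟨⟨k', g⟩, gs⟩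
          · have : groupbyColon (sec :: rest) = [(false, [sec])] := by
              simp [groupbyColon, hg, hkc]
            rw [this]
            simp [gOrd, gTri]
          · by_cases hk' : k' = true
            · subst hk'
              have : groupbyColon (sec :: rest) = (false, [sec]) :: (true, g) :: gs := by
                simp [groupbyColon, hg, hkc]
              rw [this]
              simp [gOrd, gTri]
            · have hk'f : k' = false := by simpa using hk'
              subst hk'f
              have : groupbyColon (sec :: rest) = (false, sec :: g) :: gs := by
                simp [groupbyColon, hg, hkc]
              rw [this]
              simp [gOrd, gTri]

lemma groupby_chain (sections : List String) :
    (groupbyColon sections).IsChain (fun a b => a.1 ≠ b.1) := by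
  induction sections with
  | nil => simp [groupbyColon]
  | cons sec rest ih =>
      rcases hg : groupbyColon rest with _ | ⟨⟨k', g⟩, gs⟩
      · simp [groupbyColon, hg]
      · rw [hg] at ih
        by_cases hk : PySem.Chars.isIn [':'] sec.toList = k'
        · have : groupbyColon (sec :: rest) = (k', sec :: g) :: gs := by
            simp [groupbyColon, hg, hk]
          rw [this]
          rw [List.isChain_cons] at ih ⊢
          exact ih
        · have : groupbyColon (sec :: rest) =
              (PySem.Chars.isIn [':'] sec.toList, [sec]) :: (k', g) :: gs := by
            simp [groupbyColon, hg, hk]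
          rw [this, List.isChain_cons_cons]
          exact ⟨hk, ih⟩

lemma tri_assoc (gs : List (Bool × List String)) : ∀ r p,
    gTri gs r p = (gAssoc gs r p).flatMap (fun ig => ig.2.map (fun s => (ig.1, pairOfB s))) := by
  induction gs with
  | nil => simp [gTri, gAssoc]
  | cons kg gs ih =>
      intro r p
      obtain ⟨b, g⟩ := kg
      cases b <;> simp [gTri, gAssoc, ih]

lemma assoc_lb (gs : List (Bool × List String)) : ∀ r p ig, ig ∈ gAssoc gs r p → r ≤ ig.1 := by
  induction gs with
  | nil => simp [gAssoc]
  | cons kg gs ih =>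
      intro r p ig hig
      obtain ⟨b, g⟩ := kg
      cases b with
      | false =>
          simp only [gAssoc] at hig
          exact ih r false ig (by simpa using hig)
      | true =>
          simp only [gAssoc, if_true] at hig
          rcases (by simpa using hig : ig = ((if p then r else r + 1), g) ∨
              ig ∈ gAssoc gs (if p then r else r + 1) true) with h | h
          · subst h; cases p <;> simp
          · have := ih (if p then r else r + 1) true ig h
            cases p <;> simp at this ⊢ <;> omega

lemma assoc_lb_false (gs : List (Bool × List String)) : ∀ r ig, ig ∈ gAssoc gs r false → r + 1 ≤ ig.1 := by
  induction gs with
  | nil => simp [gAssoc]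
  | cons kg gs ih =>
      intro r ig hig
      obtain ⟨b, g⟩ := kg
      cases b with
      | false =>
          simp only [gAssoc] at hig
          exact ih r ig (by simpa using hig)
      | true =>
          simp only [gAssoc, if_true, if_neg (by simp : ¬ (false = true))] at hig
          rcases (by simpa using hig : ig = (r + 1, g) ∨
              ig ∈ gAssoc gs (r + 1) true) with h | h
          · subst h; simp
          · exact assoc_lb gs (r + 1) true ig h

lemma assoc_pairwise (gs : List (Bool × List String)) (hch : gs.IsChain (fun a b => a.1 ≠ b.1)) :
    ∀ r p, (gAssoc gs r p).Pairwise (fun a b => a.1 < b.1) := by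
  induction gs with
  | nil => simp [gAssoc]
  | cons kg gs ih =>
      intro r p
      obtain ⟨b, g⟩ := kg
      have hch' : gs.IsChain (fun a b => a.1 ≠ b.1) := (List.isChain_cons.mp hch).2
      cases b with
      | false => simpa [gAssoc] using ih hch' r false
      | true =>
          simp only [gAssoc, if_true]
          refine List.Pairwise.cons ?_ (ih hch' (if p then r else r + 1) true)
          intro ig hig
          rcases gs with _ | ⟨⟨b2, g2⟩, gs2⟩
          · simp [gAssoc] at hig
          · have hb2 : b2 = false := by
              have := (List.isChain_cons_cons.mp hch).1
              simpa using Ne.symm this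
            subst hb2
            simp only [gAssoc] at hig
            have := assoc_lb_false gs2 (if p then r else r + 1) ig (by simpa using hig)
            simpa using by omega

-- filter of the tagged triples at one run id picks exactly that run's block
lemma filter_tri (as : List (Int × List String)) (hpw : as.Pairwise (fun a b => a.1 < b.1)) :
    ∀ i g, (i, g) ∈ as →
      (as.flatMap (fun ig => ig.2.map (fun s => (ig.1, pairOfB s)))).filter
          (fun t => t.1 == i) = g.map (fun s => (i, pairOfB s)) := by
  induction as with
  | nil => simp
  | cons jh as ih =>
      intro i g hig
      obtain ⟨j, h⟩ := jh
      rcases List.mem_cons.mp hig with heq | hmem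
      · injection heq with hj hg
        subst hj; subst hg
        have h1 : (List.map (fun s => (i, pairOfB s)) g).filter (fun t => t.1 == i) =
            List.map (fun s => (i, pairOfB s)) g := by
          apply List.filter_eq_self.mpr
          intro t ht
          obtain ⟨s, _, rfl⟩ := List.mem_map.mp ht
          simp
        have h2 : (as.flatMap (fun ig => ig.2.map (fun s => (ig.1, pairOfB s)))).filter
            (fun t => t.1 == i) = [] := by
          apply List.filter_eq_nil_iff.mpr
          intro t ht
          obtain ⟨ig, higm, s, _, rfl⟩ := by
            simpa only [List.mem_flatMap, List.mem_map] using ht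
          have hlt : i < ig.1 := (List.pairwise_cons.mp hpw).1 ig higm
          simp only [beq_iff_eq]
          omega
        simp only [List.flatMap_cons, List.filter_append, h1, h2, List.append_nil]
      · have hj : j < i := by
          simpa using (List.pairwise_cons.mp hpw).1 (i, g) hmem
        have h1 : (List.map (fun s => (j, pairOfB s)) h).filter (fun t => t.1 == i) = [] := by
          apply List.filter_eq_nil_iff.mpr
          intro t ht
          obtain ⟨s, _, rfl⟩ := List.mem_map.mp ht
          simp only [beq_iff_eq]
          omega
        simp only [List.flatMap_cons, List.filter_append, h1, List.nil_append]
        exact ih (List.pairwise_cons.mp hpw).2 i g hmem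

lemma tripleKeyB_inj : Function.Injective tripleKeyB := by
  intro a b hab
  obtain ⟨a1, a2, a3⟩ := a
  obtain ⟨b1, b2, b3⟩ := b
  simp only [tripleKeyB] at hab
  have h1 := congrArg (fun x => (ofLex x).1) hab
  have h2 := congrArg (fun x => (ofLex (ofLex x).2).1) hab
  have h3 := congrArg (fun x => (ofLex (ofLex x).2).2) hab
  simp only [ofLex_toLex] at h1 h2 h3
  simp_all

-- filter commutes with the global sort (ids are compared first; lex key is injective)
lemma filter_sorted (ts : List (Int × String × String)) (q : Int) :
    (PySem.List.sorted ts tripleKeyB).filter (fun t => t.1 == q) =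
      PySem.List.sorted (ts.filter (fun t => t.1 == q)) tripleKeyB := by
  refine PySem.List.eq_of_perm_of_pairwise_le_of_injective tripleKeyB tripleKeyB_inj ?_ ?_ ?_
  · exact ((PySem.List.sorted_perm ts tripleKeyB false).filter _).trans
      (PySem.List.sorted_perm (ts.filter (fun t => t.1 == q)) tripleKeyB false).symm
  · exact (PySem.List.sorted_pairwise ts tripleKeyB).filter _
  · exact PySem.List.sorted_pairwise _ tripleKeyB

lemma insertBy_map {α β : Type} (f : α → β) (before : β → β → Bool) (x : α) (acc : List α) :
    PySem.List.insertBy before (f x) (acc.map f) =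
      (PySem.List.insertBy (fun a b => before (f a) (f b)) x acc).map f := by
  induction acc with
  | nil => simp [PySem.List.insertBy]
  | cons y ys ih =>
      simp only [List.map_cons, PySem.List.insertBy]
      by_cases h : before (f x) (f y) = true <;> simp [h, ih]

lemma sorted_map {α β κ : Type} [LT κ] [DecidableLT κ] (f : α → β) (key : β → κ) (l : List α) :
    PySem.List.sorted (l.map f) key = (PySem.List.sorted l (fun a => key (f a))).map f := by
  show (l.map f).foldl (fun acc x => PySem.List.insertBy (fun a b => decide (key a < key b)) x acc) [] =
    (l.foldl (fun acc x => PySem.List.insertBy (fun a b => decide (key (f a) < key (f b))) x acc) []).map f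
  rw [List.foldl_map]
  suffices h : ∀ (acc : List α),
      l.foldl (fun acc x => PySem.List.insertBy (fun a b => decide (key a < key b)) (f x) acc) (acc.map f) =
      (l.foldl (fun acc x => PySem.List.insertBy (fun a b => decide (key (f a) < key (f b))) x acc) acc).map f by
    simpa using h []
  induction l with
  | nil => simp
  | cons x xs ih =>
      intro acc
      simp only [List.foldl_cons]
      rw [insertBy_map f (fun a b => decide (key a < key b)) x acc, ih]

-- the global lex sort restricted to one run is A's per-run pair sort
lemma sorted_block (i : Int) (pairs : List (String × String)) :
    PySem.List.sorted (pairs.map (fun pr => (i, pr))) tripleKeyB =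
      (PySem.List.sorted2 pairs Prod.fst Prod.snd).map (fun pr => (i, pr)) := by
  rw [sorted_map (fun pr => (i, pr)) tripleKeyB pairs]
  congr 1
  show pairs.foldl (fun acc x => PySem.List.insertBy
      (fun a b => decide (tripleKeyB (i, a) < tripleKeyB (i, b))) x acc) [] =
    pairs.foldl (fun acc x => PySem.List.insertBy
      (fun a b => decide (a.1 < b.1) || (!decide (b.1 < a.1) && decide (a.2 < b.2))) x acc) []
  have hbe : (fun (a b : String × String) => decide (tripleKeyB (i, a) < tripleKeyB (i, b))) =
      (fun (a b : String × String) =>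
        decide (a.1 < b.1) || (!decide (b.1 < a.1) && decide (a.2 < b.2))) := by
    funext a b
    have hlt : tripleKeyB (i, a) < tripleKeyB (i, b) ↔
        (a.1 < b.1 ∨ (a.1 = b.1 ∧ a.2 < b.2)) := by
      simp [tripleKeyB, Prod.Lex.lt_iff]
    by_cases h1 : a.1 < b.1
    · simp [hlt, h1]
    · by_cases h2 : b.1 < a.1
      · have hne : a.1 ≠ b.1 := ne_of_gt h2
        simp [hlt, h1, h2, hne]
      · have heq : a.1 = b.1 := le_antisymm (le_of_not_gt h2) (le_of_not_gt h1)
        simp [hlt, heq]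
  rw [hbe]

lemma getD_build (ts : List (Int × String × String)) :
    ∀ (d : PySem.Dict Int (List String)) (q : Int),
      (ts.foldl (fun d t =>
          d.insert t.1 (d.getD t.1 [] ++ [PySem.Str.join "" [t.2.1, ": ", t.2.2]])) d).getD q [] =
        d.getD q [] ++ (ts.filter (fun t => t.1 == q)).map
          (fun t => PySem.Str.join "" [t.2.1, ": ", t.2.2]) := by
  induction ts with
  | nil => simp
  | cons t ts ih =>
      intro d q
      simp only [List.foldl_cons]
      rw [ih]
      rw [PySem.Dict.getD_insert]
      by_cases hq : q = t.1
      · subst hq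
        simp
      · have : (t.1 == q) = false := by simp [Ne.symm hq]
        simp [this, hq]

lemma join_colon (k v : String) :
    PySem.Str.join ": " [k, v] = PySem.Str.join "" [k, ": ", v] := by
  simp [PySem.Str.join, PySem.Chars.join, List.intercalate]

-- rendering B's skeleton through the dict reproduces A's flatMap over the runs
lemma parts_bridge (byRun : PySem.Dict Int (List String)) :
    ∀ (gs : List (Bool × List String)), gs.IsChain (fun a b => a.1 ≠ b.1) →
    ∀ r p, (p = true → ∀ g', gs.head? ≠ some (true, g')) →
      (∀ ig ∈ gAssoc gs r p, byRun.getD ig.1 [] =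
        (PySem.List.sorted2 (ig.2.map pairOfB) Prod.fst Prod.snd).map
          (fun pr => PySem.Str.join "" [pr.1, ": ", pr.2])) →
      (gOrd gs r p).map (fun t =>
          match t with
          | Sum.inl r => PySem.Str.join ", " (byRun.getD r [])
          | Sum.inr s => s) =
        gs.flatMap fun kg =>
          if kg.1 then
            [PySem.Str.join ", "
              ((PySem.List.sorted2 (kg.2.map pairOfB) Prod.fst Prod.snd).map
                fun p => PySem.Str.join ": " [p.1, p.2])]
          else kg.2.map PySem.Str.strip := by
  intro gs
  induction gs with
  | nil => intro _ r p _ _; simp [gOrd]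
  | cons kg gs ih =>
      intro hch r p hp hH
      obtain ⟨b, g⟩ := kg
      have hch' : gs.IsChain (fun a b => a.1 ≠ b.1) := (List.isChain_cons.mp hch).2
      cases b with
      | false =>
          have htail := ih hch' r false (by simp) (by
            intro ig hig
            exact hH ig (by simp [gAssoc, hig]))
          simp only [gOrd, List.map_append, List.map_map, htail, List.flatMap_cons,
            Bool.false_eq_true, if_false]
          rfl
      | true =>
          have hp0 : p = false := by
            cases p
            · rfl
            · exact absurd rfl (hp rfl g)
          subst hp0
          have hhead : byRun.getD (r + 1) [] =
              (PySem.List.sorted2 (g.map pairOfB) Prod.fst Prod.snd).map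
                (fun pr => PySem.Str.join "" [pr.1, ": ", pr.2]) :=
            hH ((r + 1), g) (by simp [gAssoc])
          have htail := ih hch' (r + 1) true (by
              intro _ g' hg'
              rcases gs with _ | ⟨⟨b2, g2⟩, gs2⟩
              · simp at hg'
              · have : b2 ≠ true := by
                  have := (List.isChain_cons_cons.mp hch).1
                  simpa using Ne.symm this
                simp at hg'
                exact this hg'.1)
            (by
              intro ig hig
              exact hH ig (by simp [gAssoc, hig]))
          show ((if false = true then [] else [Sum.inl (r + 1)]) ++
              gOrd gs (if false = true then r else r + 1) true).map _ = _
          simp only [Bool.false_eq_true, if_false, List.map_append, htail, List.flatMap_cons, if_true]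
          congr 1
          simp only [List.map_cons, List.map_nil]
          have hmc : (PySem.List.sorted2 (g.map pairOfB) Prod.fst Prod.snd).map
                (fun pr => PySem.Str.join "" [pr.1, ": ", pr.2]) =
              (PySem.List.sorted2 (g.map pairOfB) Prod.fst Prod.snd).map
                (fun p => PySem.Str.join ": " [p.1, p.2]) := by
            apply List.map_congr_left
            intro pr _
            rw [← join_colon]
          simp only [hhead, hmc]

-- the two formatted part lists coincide on any segment list
lemma core (segs : List String) :
    ((scanSegsB segs 0 false [] []).1.map (fun t =>
        match t with
        | Sum.inl r => PySem.Str.join ", "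
            ((((PySem.List.sorted (scanSegsB segs 0 false [] []).2 tripleKeyB).foldl
                (fun d t => d.insert t.1
                  (d.getD t.1 [] ++ [PySem.Str.join "" [t.2.1, ": ", t.2.2]]))
                (PySem.Dict.empty : PySem.Dict Int (List String))).getD r []))
        | Sum.inr s => s)) = (groupPropsA segs []).map fmtPartA := by
  have hscan := scan_main segs 0 false [] []
  rw [hscan, parts_eq]
  simp only [List.nil_append]
  apply parts_bridge _ (groupbyColon segs) (groupby_chain segs) 0 false (by simp)
  intro ig hig
  obtain ⟨i, g⟩ := ig
  rw [getD_build]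
  have hempty : (PySem.Dict.empty : PySem.Dict Int (List String)).getD i [] = [] := rfl
  rw [hempty, List.nil_append, filter_sorted, tri_assoc,
    filter_tri (gAssoc (groupbyColon segs) 0 false)
      (assoc_pairwise (groupbyColon segs) (groupby_chain segs) 0 false) i g hig]
  have hmm : g.map (fun s => (i, pairOfB s)) = (g.map pairOfB).map (fun pr => (i, pr)) := by
    rw [List.map_map]; rfl
  rw [hmm, sorted_block i (g.map pairOfB), List.map_map]
  rfl

-- ===== VERDICT (by name: the statement is the Claim_ definition above) =====
theorem sort_props_py_spec : Claim_equal_sort_props_py := by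
  intro line _
  unfold Spec_sort_props_py sort_props_py sort_props_py_alt
  cases h : PySem.Str.splitMax? line "  ;" 1 with
  | none => rfl
  | some comps =>
      match comps with
      | [] => rfl
      | [_] => rfl
      | [code, cmt] => simp [core]
      | _ :: _ :: _ :: _ => simp [List.length]
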